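-- pv_equiv track=rewrite | github.com/Hieuduong2509/NCKH_NEW | src/constraints/hard.py | check_instructor_load
-- ===== SOURCE A (Python) =====
-- from collections import defaultdict
-- from typing import List, Dict, Set, Tuple, Any, Optional
--
-- def parse_time_slot(time_slot_str: Any) -> Tuple[Optional[int], Optional[int]]:
--     """
--     Safely parses a "day-period" string such as "1-3" into integers.
--     Returns (None, None) for invalid inputs.
--     """
--     if not isinstance(time_slot_str, str):
--         return None, None
--
--     clean = time_slot_str.strip()
--     if "-" not in clean:
--         return None, None
--
--     try:
--         parts = clean.split("-", maxsplit=1)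
--         day = int(parts[0].strip())
--         period = int(parts[1].strip())
--         return day, period
--     except (ValueError, IndexError):
--         return None, None
--
-- def _add_violation(course_id: Any, constraint_name: str,
--                    all_violating_ids: Set[str],
--                    violation_details: Dict[str, List[str]]):
--     """
--     Records a specific constraint violation for a given course ID.
--     """
--     cid = str(course_id)
--     all_violating_ids.add(cid)
--
--     # Initialize list if missing (defensive)
--     if cid not in violation_details:
--         violation_details[cid] = []
--
--     if constraint_name not in violation_details[cid]:
--         violation_details[cid].append(constraint_name)
--
-- def check_instructor_load(instructor_schedule: Dict, instructor_map: Dict, ids: Set, details: Dict) -> int: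
--     """
--     Ensures instructor max daily load is not exceeded.
--     """
--     violations = 0
--     for inst_id, time_slots in instructor_schedule.items():
--         daily_load = defaultdict(int)
--
--         for ts, courses in time_slots.items():
--             if not courses: continue
--             day, _ = parse_time_slot(ts)
--             if day is not None:
--                 daily_load[day] += 1
--
--         inst_info = instructor_map.get(str(inst_id))
--         max_load = int(inst_info.get('max_courses_per_day', 4)) if inst_info else 4
--
--         for day, count in daily_load.items():
--             if count > max_load:
--                 for ts, courses in time_slots.items():
--                     d, _ = parse_time_slot(ts)
--                     if d == day:
--                         for c in courses:
--                             _add_violation(c['course_id'], "Instructor Daily Load", ids, details)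
--                             violations += 1
--     return violations
-- ===== SOURCE B (Python) =====
-- from collections import defaultdict, Counter
-- from typing import List, Dict, Set, Tuple, Any, Optional
--
-- def parse_time_slot(time_slot_str: Any) -> Tuple[Optional[int], Optional[int]]:
--     if not isinstance(time_slot_str, str):
--         return None, None
--     clean = time_slot_str.strip()
--     if "-" not in clean:
--         return None, None
--     try:
--         parts = clean.split("-", maxsplit=1)
--         day = int(parts[0].strip())
--         period = int(parts[1].strip())
--         return day, period
--     except (ValueError, IndexError):
--         return None, None
--
-- def _add_violation(course_id, constraint_name, all_violating_ids, violation_details):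
--     cid = str(course_id)
--     all_violating_ids.add(cid)
--     if cid not in violation_details:
--         violation_details[cid] = []
--     if constraint_name not in violation_details[cid]:
--         violation_details[cid].append(constraint_name)
--
-- def check_instructor_load(instructor_schedule, instructor_map, ids, details) -> int:
--     """Staged passes instead of A's per-day rescan: parse each slot once into a
--     (day, courses) list, count loaded days with a Counter, precompute the set of
--     overloaded days, then a single sweep over the parsed slots tallies violations.
--     Same return value; ids/details receive the same violations (day order may differ)."""
--     total = 0
--     for inst_id, time_slots in instructor_schedule.items():
--         parsed = [(parse_time_slot(ts)[0], courses)
--                   for ts, courses in time_slots.items()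
--                   if parse_time_slot(ts)[0] is not None]
--         counts = Counter(d for d, courses in parsed if courses)
--         info = instructor_map.get(str(inst_id)) or {}
--         max_load = int(info.get('max_courses_per_day', 4))
--         bad = {d for d, n in counts.items() if n > max_load}
--         for d, courses in parsed:
--             if d in bad:
--                 for c in courses:
--                     _add_violation(c['course_id'], "Instructor Daily Load", ids, details)
--                     total += 1
--     return total
-- ===== Notes on version B (the rewrite author's own statement) =====
-- stated objective: alternative
-- what changed: A rescans every time slot once per overloaded day (nested daily_load x time_slots loops); B parses each slot once into a (day, courses) list, builds a Counter of loaded days and the set of overloaded days, then a single linear sweep over the parsed slots counts the violations.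
import Mathlib
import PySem

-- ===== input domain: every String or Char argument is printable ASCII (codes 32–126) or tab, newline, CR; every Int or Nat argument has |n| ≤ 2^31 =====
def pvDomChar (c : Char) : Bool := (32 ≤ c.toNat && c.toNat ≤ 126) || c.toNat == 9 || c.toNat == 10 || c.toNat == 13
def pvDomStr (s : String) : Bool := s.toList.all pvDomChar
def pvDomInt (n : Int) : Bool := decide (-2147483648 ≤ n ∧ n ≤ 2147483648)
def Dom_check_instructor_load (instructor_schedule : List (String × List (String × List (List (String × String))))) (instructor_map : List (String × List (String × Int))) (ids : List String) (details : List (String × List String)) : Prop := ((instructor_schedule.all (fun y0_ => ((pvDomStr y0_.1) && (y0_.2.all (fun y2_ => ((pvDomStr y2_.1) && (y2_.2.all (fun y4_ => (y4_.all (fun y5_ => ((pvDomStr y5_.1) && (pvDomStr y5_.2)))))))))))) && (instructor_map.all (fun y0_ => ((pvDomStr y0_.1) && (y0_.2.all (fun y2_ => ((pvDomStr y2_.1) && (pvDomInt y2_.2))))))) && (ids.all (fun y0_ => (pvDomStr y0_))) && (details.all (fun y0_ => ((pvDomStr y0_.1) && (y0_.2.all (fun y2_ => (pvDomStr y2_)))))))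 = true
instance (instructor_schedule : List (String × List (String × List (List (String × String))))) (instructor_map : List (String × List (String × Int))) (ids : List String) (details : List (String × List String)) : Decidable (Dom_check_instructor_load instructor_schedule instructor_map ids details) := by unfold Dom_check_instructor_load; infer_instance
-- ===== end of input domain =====

-- B replaces A's per-overloaded-day rescan of all time slots by staged passes: parse each
-- slot once into a (day, courses) list, count loaded days with a Counter, precompute the set
-- of overloaded days, then one sweep over the parsed slots tallies violations. A and B
-- mutate `ids`/`details` the same way up to day order; the equivalence proved here is about
-- the RETURN value (the violation count) only.

-- ===== PORT A =====
-- parse_time_slot (both Pythons contain this same module helper verbatim)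
def pyParseTimeSlot (ts : String) : Option Int × Option Int :=
  let clean := PySem.Chars.strip ts.toList
  if PySem.Chars.isIn ['-'] clean then
    match PySem.Chars.splitOnMax clean ['-'] 1 with
    | p0 :: p1 :: _ =>
      match PySem.Int.ofChars? (PySem.Chars.strip p0) with
      | some d =>
        match PySem.Int.ofChars? (PySem.Chars.strip p1) with
        | some p => (some d, some p)
        | none => (none, none)
      | none => (none, none)
    | _ => (none, none)  -- unreachable: '-' ∈ clean gives two parts; Python's except IndexError
  else (none, none)

def check_instructor_load (instructor_schedule : List (String × List (String × List (List (String × String))))) (instructor_map : List (String × List (String × Int))) (ids : List String) (details : List (String × List String)) : Int :=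
  instructor_schedule.foldl (fun (violations : Int) (entry : String × List (String × List (List (String × String)))) =>
    let time_slots := entry.2
    let daily_load : PySem.Dict Int Int :=
      time_slots.foldl (fun d slot =>
        if slot.2.isEmpty then d
        else
          match (pyParseTimeSlot slot.1).1 with
          | some day => d.modify day 0 (· + 1)
          | none => d) PySem.Dict.empty
    let max_load : Int :=
      match (PySem.Dict.ofList instructor_map).get? entry.1 with
      | some info => (PySem.Dict.ofList info).getD "max_courses_per_day" 4
      | none => 4
    daily_load.items.foldl (fun violations it =>
      if max_load < it.2 then
        time_slots.foldl (fun v slot =>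
          if (pyParseTimeSlot slot.1).1 = some it.1 then
            slot.2.foldl (fun v _ => v + 1) v  -- _add_violation only mutates ids/details
          else v) violations
      else violations) violations) 0

-- ===== PORT B =====
def check_instructor_load_alt (instructor_schedule : List (String × List (String × List (List (String × String))))) (instructor_map : List (String × List (String × Int))) (ids : List String) (details : List (String × List String)) : Int :=
  instructor_schedule.foldl (fun (total : Int) (entry : String × List (String × List (List (String × String)))) =>
    let parsed : List (Int × List (List (String × String))) :=
      entry.2.filterMap (fun slot => ((pyParseTimeSlot slot.1).1).map (fun d => (d, slot.2)))
    let counts : PySem.Dict Int Int :=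
      PySem.Dict.counter ((parsed.filter (fun p => !p.2.isEmpty)).map (fun p => p.1))
    let max_load : Int :=  -- info = instructor_map.get(inst_id) or {}; info.get('max_courses_per_day', 4)
      (PySem.Dict.ofList ((PySem.Dict.ofList instructor_map).getD entry.1 [])).getD "max_courses_per_day" 4
    let bad : PySem.Set Int :=
      PySem.Set.ofList ((counts.items.filter (fun it => max_load < it.2)).map (fun it => it.1))
    parsed.foldl (fun v p =>
      if PySem.Set.contains bad p.1 then
        p.2.foldl (fun v _ => v + 1) v  -- _add_violation only mutates ids/details
      else v) total) 0

-- ===== PRECONDITION & SPEC =====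
-- helpers for Pre_ (shape tests on the input; they do not reach either port)
def pvHasId (c : List (String × String)) : Bool := c.any (fun kv => kv.1 == "course_id")
def pvDayCountNE (L : List (String × List (List (String × String)))) (d : Int) : Nat :=
  (L.filter (fun q => decide ((pyParseTimeSlot q.1).1 = some d) && !q.2.isEmpty)).length
def pvMaxLoad (instructor_map : List (String × List (String × Int))) (k : String) : Int :=
  match (PySem.Dict.ofList instructor_map).get? k with
  | some info => (PySem.Dict.ofList info).getD "max_courses_per_day" 4
  | none => 4

-- Pre_ excludes exactly the inputs on which Python A raises KeyError: an instructor with an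
-- overloaded day (more non-empty slots on that day than the instructor's max load) one of whose
-- courses on that day lacks the 'course_id' key; B raises the same KeyError there.
def Pre_check_instructor_load (instructor_schedule : List (String × List (String × List (List (String × String))))) (instructor_map : List (String × List (String × Int))) (ids : List String) (details : List (String × List String)) : Prop :=
  (instructor_schedule.all (fun e =>
    e.2.all (fun q =>
      match (pyParseTimeSlot q.1).1 with
      | none => true
      | some d =>
        decide ((pvDayCountNE e.2 d : Int) ≤ pvMaxLoad instructor_map e.1) ||
        e.2.all (fun q' => !(decide ((pyParseTimeSlot q'.1).1 = some d)) || q'.2.all pvHasId)))) = true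
instance (instructor_schedule : List (String × List (String × List (List (String × String))))) (instructor_map : List (String × List (String × Int))) (ids : List String) (details : List (String × List String)) : Decidable (Pre_check_instructor_load instructor_schedule instructor_map ids details) := by unfold Pre_check_instructor_load; infer_instance

def pvWitness_check_instructor_load : (List (String × List (String × List (List (String × String))))) × (List (String × List (String × Int))) × List String × (List (String × List String)) :=
  ([("i1", [("1-2", [[("course_id", "c1")]]), ("1-3", [])])], [("i1", [("max_courses_per_day", 1)])], [], [])

def Spec_check_instructor_load (instructor_schedule : List (String × List (String × List (List (String × String))))) (instructor_map : List (String × List (String × Int))) (ids : List String) (details : List (String × List String)) (out : Int) : Prop := out = check_instructor_load_alt instructor_schedule instructor_map ids details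
instance (instructor_schedule : List (String × List (String × List (List (String × String))))) (instructor_map : List (String × List (String × Int))) (ids : List String) (details : List (String × List String)) (out : Int) : Decidable (Spec_check_instructor_load instructor_schedule instructor_map ids details out) := by unfold Spec_check_instructor_load; infer_instance

-- ===== CLAIM (what is proved, stated in full; the proofs are below) =====
def Claim_equal_check_instructor_load : Prop := ∀ (instructor_schedule : List (String × List (String × List (List (String × String))))) (instructor_map : List (String × List (String × Int))) (ids : List String) (details : List (String × List String)), Dom_check_instructor_load instructor_schedule instructor_map ids details → Pre_check_instructor_load instructor_schedule instructor_map ids details → Spec_check_instructor_load instructor_schedule instructor_map ids details (check_instructor_load instructor_schedule instructor_map ids details)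

-- ===== LEMMAS AND PROOFS =====

-- abbreviations for the proof (not used by the ports or the claim)
def pvSlotDay (slot : String × List (List (String × String))) : Option Int := (pyParseTimeSlot slot.1).1
-- days of non-empty parsed slots (the multiset A's daily_load counts)
def pvDays1 (L : List (String × List (List (String × String)))) : List Int :=
  L.filterMap (fun slot => if slot.2.isEmpty then none else pvSlotDay slot)
-- parsed (day, courses) pairs (B's `parsed` list)
def pvParsed (L : List (String × List (List (String × String)))) : List (Int × List (List (String × String))) :=
  L.filterMap (fun slot => (pvSlotDay slot).map (fun d => (d, slot.2)))
-- the per-day violation mass: total number of courses sitting in slots of that day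
def pvS (L : List (String × List (List (String × String)))) (d : Int) : Int :=
  (L.map (fun slot => if pvSlotDay slot = some d then (slot.2.length : Int) else 0)).sum

-- a foldl that only adds to its accumulator is the accumulator plus a sum
theorem pv_foldl_acc {α : Type} (step : Int → α → Int) (f : α → Int)
    (h : ∀ a x, step a x = a + f x) : ∀ (l : List α) (a : Int), l.foldl step a = a + (l.map f).sum := by
  intro l
  induction l with
  | nil => simp
  | cons x xs ih => intro a; simp only [List.foldl_cons, List.map_cons, List.sum_cons, h, ih]; ring

theorem pv_foldl_len {α : Type} : ∀ (g : List α) (a : Int), g.foldl (fun v _ => v + 1) a = a + g.length := by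
  intro g
  induction g with
  | nil => simp
  | cons x xs ih => intro a; simp [ih]; omega

theorem pv_sum_map_add {α : Type} (f g : α → Int) : ∀ (l : List α),
    (l.map (fun x => f x + g x)).sum = (l.map f).sum + (l.map g).sum := by
  intro l
  induction l with
  | nil => simp
  | cons x xs ih => simp [ih]; ring

-- A's scan of all slots of day d adds pvS
theorem pv_scan_eq (L : List (String × List (List (String × String)))) (d : Int) (a : Int) :
    L.foldl (fun v slot =>
        if (pyParseTimeSlot slot.1).1 = some d then slot.2.foldl (fun v _ => v + 1) v else v) a
      = a + pvS L d := by
  refine pv_foldl_acc _ (fun slot => if pvSlotDay slot = some d then (slot.2.length : Int) else 0) ?_ L a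
  intro a slot
  by_cases h : pvSlotDay slot = some d
  · simp [pvSlotDay] at h; simp [h, pv_foldl_len, pvSlotDay]
  · simp [pvSlotDay] at h; simp [h, pvSlotDay]

-- A's daily_load loop, rephrased over the parsed day list
theorem pv_daily_fold (L : List (String × List (List (String × String)))) :
    ∀ dict : PySem.Dict Int Int,
      L.foldl (fun d slot =>
        if slot.2.isEmpty then d
        else
          match (pyParseTimeSlot slot.1).1 with
          | some day => d.modify day 0 (· + 1)
          | none => d) dict
      = (pvDays1 L).foldl (fun d x => d.modify x 0 (· + 1)) dict := by
  induction L with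
  | nil => intro dict; rfl
  | cons s rest ih =>
    intro dict
    rw [List.foldl_cons]
    by_cases he : s.2.isEmpty
    · have h1 : pvDays1 (s :: rest) = pvDays1 rest := by
        simp [pvDays1, List.filterMap_cons, List.isEmpty_iff.mp he]
      have h2 : (if s.2.isEmpty then dict
          else
            match (pyParseTimeSlot s.1).1 with
            | some day => dict.modify day 0 (· + 1)
            | none => dict) = dict := by rw [if_pos he]
      rw [h2, h1]; exact ih dict
    · cases hp : (pyParseTimeSlot s.1).1 with
      | none =>
        have he' : ¬ s.2 = [] := by simpa [List.isEmpty_iff] using he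
        have h1 : pvDays1 (s :: rest) = pvDays1 rest := by
          simp [pvDays1, List.filterMap_cons, he', pvSlotDay, hp]
        rw [if_neg he, h1]; exact ih dict
      | some day =>
        have he' : ¬ s.2 = [] := by simpa [List.isEmpty_iff] using he
        have h1 : pvDays1 (s :: rest) = day :: pvDays1 rest := by
          simp [pvDays1, List.filterMap_cons, he', pvSlotDay, hp]
        rw [if_neg he, h1, List.foldl_cons]; exact ih _

-- the day list B feeds to Counter is exactly A's daily_load day multiset
theorem pv_parsedNE (L : List (String × List (List (String × String)))) :
    ((pvParsed L).filter (fun p => !p.2.isEmpty)).map (fun p => p.1) = pvDays1 L := by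
  induction L with
  | nil => rfl
  | cons s rest ih =>
    cases hp : pvSlotDay s with
    | none =>
      by_cases he : s.2 = [] <;>
        simp [pvParsed, pvDays1, List.filterMap_cons, hp, he] at ih ⊢ <;>
        simpa [pvParsed, pvDays1] using ih
    | some day =>
      by_cases he : s.2 = [] <;>
        simp [pvParsed, pvDays1, List.filterMap_cons, hp, he] at ih ⊢ <;>
        simpa [pvParsed, pvDays1] using ih

-- pvS as a sum over the parsed pairs
theorem pv_pvS_parsed (L : List (String × List (List (String × String)))) (k : Int) :
    pvS L k = ((pvParsed L).map (fun p => if p.1 = k then (p.2.length : Int) else 0)).sum := by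
  induction L with
  | nil => simp [pvS, pvParsed]
  | cons s rest ih =>
    cases hp : pvSlotDay s with
    | none => simpa [pvS, pvParsed, List.filterMap_cons, hp] using ih
    | some day =>
      rcases eq_or_ne day k with hd | hd <;>
        simp [pvS, pvParsed, List.filterMap_cons, hp, hd] at ih ⊢ <;>
        simpa [pvS, pvParsed] using ih

-- the grouping swap: a guarded sum over distinct days equals the guarded sweep over parsed slots
theorem pv_swap (L : List (String × List (List (String × String)))) (q : Int → Prop)
    [DecidablePred q] : ∀ (S : List Int), S.Nodup →
    (S.map (fun k => if q k then pvS L k else 0)).sum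
      = ((pvParsed L).map (fun p => if p.1 ∈ S ∧ q p.1 then (p.2.length : Int) else 0)).sum := by
  intro S
  induction S with
  | nil => intro _; simp
  | cons k S' ih =>
    intro hnd
    rw [List.nodup_cons] at hnd
    obtain ⟨hk, hnd'⟩ := hnd
    have hsplit : ((pvParsed L).map (fun p => if p.1 ∈ k :: S' ∧ q p.1 then (p.2.length : Int) else 0))
        = (pvParsed L).map (fun p =>
            (if p.1 = k ∧ q p.1 then (p.2.length : Int) else 0)
            + (if p.1 ∈ S' ∧ q p.1 then (p.2.length : Int) else 0)) := by
      apply List.map_congr_left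
      intro p _
      by_cases h3 : q p.1
      · by_cases h1 : p.1 = k
        · have h2 : p.1 ∉ S' := h1 ▸ hk
          simp [List.mem_cons, h1, h3]
          exact fun hks _ => absurd hks (h1 ▸ h2)
        · by_cases h2 : p.1 ∈ S' <;> simp [List.mem_cons, h1, h2, h3]
      · simp [h3]
    rw [hsplit, pv_sum_map_add]
    have hfirst : ((pvParsed L).map (fun p => if p.1 = k ∧ q p.1 then (p.2.length : Int) else 0)).sum
        = if q k then pvS L k else 0 := by
      by_cases hq : q k
      · rw [if_pos hq, pv_pvS_parsed L k]
        congr 1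
        apply List.map_congr_left
        intro p _
        by_cases h1 : p.1 = k <;> simp [h1, hq]
      · rw [if_neg hq]
        have : ((pvParsed L).map (fun p => if p.1 = k ∧ q p.1 then (p.2.length : Int) else 0))
            = (pvParsed L).map (fun _ => (0 : Int)) := by
          apply List.map_congr_left
          intro p _
          by_cases h1 : p.1 = k <;> simp [h1, hq]
        simp [this]
    rw [List.map_cons, List.sum_cons, hfirst, ih hnd']
-- set membership test, Bool to Prop
theorem pv_contains_iff (s : PySem.Set Int) (x : Int) :
    (PySem.Set.contains s x = true) ↔ x ∈ s := by
  simp [PySem.Set.contains]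

-- B's `or {}`-style max-load lookup equals A's match on get?
theorem pv_maxload_eq (im : List (String × List (String × Int))) (k : String) :
    (PySem.Dict.ofList ((PySem.Dict.ofList im).getD k [])).getD "max_courses_per_day" 4
      = (match (PySem.Dict.ofList im).get? k with
         | some info => (PySem.Dict.ofList info).getD "max_courses_per_day" 4
         | none => (4 : Int)) := by
  cases h : (PySem.Dict.ofList im).get? k <;>
    simp [PySem.Dict.getD, h] <;> rfl

-- per-instructor equality of the two bodies
theorem pv_entry_eq (im : List (String × List (String × Int)))
    (e : String × List (String × List (List (String × String)))) (v : Int) :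
    (let time_slots := e.2
     let daily_load : PySem.Dict Int Int :=
       time_slots.foldl (fun d slot =>
         if slot.2.isEmpty then d
         else
           match (pyParseTimeSlot slot.1).1 with
           | some day => d.modify day 0 (· + 1)
           | none => d) PySem.Dict.empty
     let max_load : Int :=
       match (PySem.Dict.ofList im).get? e.1 with
       | some info => (PySem.Dict.ofList info).getD "max_courses_per_day" 4
       | none => 4
     daily_load.items.foldl (fun violations it =>
       if max_load < it.2 then
         time_slots.foldl (fun v slot =>
           if (pyParseTimeSlot slot.1).1 = some it.1 then
             slot.2.foldl (fun v _ => v + 1) v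
           else v) violations
       else violations) v)
    =
    (let parsed : List (Int × List (List (String × String))) :=
       e.2.filterMap (fun slot => ((pyParseTimeSlot slot.1).1).map (fun d => (d, slot.2)))
     let counts : PySem.Dict Int Int :=
       PySem.Dict.counter ((parsed.filter (fun p => !p.2.isEmpty)).map (fun p => p.1))
     let max_load : Int :=
       (PySem.Dict.ofList ((PySem.Dict.ofList im).getD e.1 [])).getD "max_courses_per_day" 4
     let bad : PySem.Set Int :=
       PySem.Set.ofList ((counts.items.filter (fun it => max_load < it.2)).map (fun it => it.1))
     parsed.foldl (fun v p =>
       if PySem.Set.contains bad p.1 then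
         p.2.foldl (fun v _ => v + 1) v
       else v) v) := by
  dsimp only
  rw [pv_maxload_eq im e.1]
  set m : Int := (match (PySem.Dict.ofList im).get? e.1 with
    | some info => (PySem.Dict.ofList info).getD "max_courses_per_day" 4
    | none => 4 : Int) with hm
  -- A side
  rw [pv_daily_fold e.2 PySem.Dict.empty, ← PySem.Dict.counter_eq_foldl (pvDays1 e.2)]
  have HaccA := pv_foldl_acc
        (fun (violations : Int) (it : Int × Int) =>
          if m < it.2 then
            e.2.foldl (fun v slot =>
              if (pyParseTimeSlot slot.1).1 = some it.1 then
                slot.2.foldl (fun v _ => v + 1) v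
              else v) violations
          else violations)
        (fun it => if m < it.2 then pvS e.2 it.1 else 0)
        (by
          intro a it
          by_cases hlt : m < it.2
          · simp only [hlt, if_pos, pv_scan_eq]
          · simp [hlt])
  rw [HaccA (PySem.Dict.counter (pvDays1 e.2)).items v]
  rw [PySem.Dict.items_counter (pvDays1 e.2), List.map_map]
  have hfunA : ((fun it => if m < it.2 then pvS e.2 it.1 else 0) ∘
        (fun k => (k, ((pvDays1 e.2).count k : Int))))
      = (fun k => if m < ((pvDays1 e.2).count k : Int) then pvS e.2 k else 0) := by
    funext k; rfl
  rw [hfunA]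
  -- B side
  have hparsed : e.2.filterMap (fun slot => ((pyParseTimeSlot slot.1).1).map (fun d => (d, slot.2)))
      = pvParsed e.2 := rfl
  rw [hparsed, pv_parsedNE e.2]
  set bad : PySem.Set Int :=
    PySem.Set.ofList (((PySem.Dict.counter (pvDays1 e.2)).items.filter
      (fun it => m < it.2)).map (fun it => it.1)) with hbaddef
  have HaccB := pv_foldl_acc
        (fun (v : Int) (p : Int × List (List (String × String))) =>
          if PySem.Set.contains bad p.1 then p.2.foldl (fun v _ => v + 1) v else v)
        (fun p => if PySem.Set.contains bad p.1 then (p.2.length : Int) else 0)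
        (by
          intro a p
          dsimp only
          by_cases hc : PySem.Set.contains bad p.1 = true
          · rw [if_pos hc, if_pos hc, pv_foldl_len]
          · rw [if_neg hc, if_neg hc]; omega)
  rw [HaccB (pvParsed e.2) v]
  congr 1
  -- characterise membership in `bad`
  have hbadmem : ∀ x : Int, (PySem.Set.contains bad x = true)
      ↔ (x ∈ PySem.Set.ofList (pvDays1 e.2) ∧ m < ((pvDays1 e.2).count x : Int)) := by
    intro x
    rw [pv_contains_iff, hbaddef, PySem.Set.mem_ofList, PySem.Dict.items_counter]
    constructor
    · intro hx
      rcases List.mem_map.mp hx with ⟨it, hit, hx1⟩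
      rcases List.mem_filter.mp hit with ⟨hmem, hlt⟩
      rcases List.mem_map.mp hmem with ⟨k, hk, hkit⟩
      subst hkit
      subst hx1
      exact ⟨hk, by simpa using hlt⟩
    · intro hx
      exact List.mem_map.mpr ⟨(x, ((pvDays1 e.2).count x : Int)),
        List.mem_filter.mpr ⟨List.mem_map.mpr ⟨x, hx.1, rfl⟩, by simpa using hx.2⟩, rfl⟩
  have hptwise : ((pvParsed e.2).map
        (fun p => if PySem.Set.contains bad p.1 then (p.2.length : Int) else 0))
      = (pvParsed e.2).map (fun p =>
          if p.1 ∈ PySem.Set.ofList (pvDays1 e.2) ∧ m < ((pvDays1 e.2).count p.1 : Int)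
          then (p.2.length : Int) else 0) := by
    apply List.map_congr_left
    intro p _
    by_cases hc : PySem.Set.contains bad p.1 = true
    · rw [if_pos hc, if_pos ((hbadmem p.1).mp hc)]
    · rw [if_neg hc, if_neg (fun h => hc ((hbadmem p.1).mpr h))]
  rw [hptwise]
  exact pv_swap e.2 (fun k => m < ((pvDays1 e.2).count k : Int))
    (PySem.Set.ofList (pvDays1 e.2)) (PySem.Set.nodup_ofList _)

-- ===== VERDICT (by name: the statement is the Claim_ definition above) =====
theorem check_instructor_load_spec : Claim_equal_check_instructor_load := by
  intro sched im ids details _ _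
  show check_instructor_load sched im ids details = check_instructor_load_alt sched im ids details
  unfold check_instructor_load check_instructor_load_alt
  refine List.foldl_ext _ _ 0 ?_
  intro a e _
  exact pv_entry_eq im e a
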